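-- pv_equiv track=rewrite | github.com/makto-toruk/aoc2022 | day25/part1.py | compute
-- ===== SOURCE A (Python) =====
-- numerals = {"2": 2, "1": 1, "0": 0, "-": -1, "=": -2}
--
-- encoders = {v: k for k, v in numerals.items()}
--
-- def decode(xs):
--
--     k = len(xs)
--     n = 0
--     for i, x in enumerate(xs):
--         n += numerals[x] * (5 ** (k - 1 - i))
--
--     return n
--
-- def encode(n):
--
--     s = ""
--     ls = {}
--     i = 0
--     while n > 0:
--         t = n % 5
--         ls[i] = t
--         n = n // 5
--         i += 1
--
--     digits = max(ls.keys())
--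
--     for i in range(digits):
--         l = ls[i]
--         if l <= 2:
--             continue
--         else:
--             ls[i] = l - 5
--             if (i + 1) in ls:
--                 ls[i + 1] += 1
--             else:
--                 ls[i + 1] = 1
--
--     ps = [0] * (max(ls.keys()) + 1)
--     for i, l in ls.items():
--         ps[i] = l
--
--     for p in ps:
--         s = encoders[p] + s
--
--     return s
--
-- def compute(input: str) -> str:
--
--     xs = input.splitlines()
--
--     n = 0
--     for x in xs:
--         n += decode(x)
--
--     assert decode("2=") == 8
--     assert decode("20") == 10
--     assert decode("2=-01") == 976
--     assert decode("1121-1110-1=0") == 314159265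
--
--     return encode(n)
-- ===== SOURCE B (Python) =====
-- numerals = {"2": 2, "1": 1, "0": 0, "-": -1, "=": -2}
--
-- encoders = {v: k for k, v in numerals.items()}
--
-- def compute(input: str) -> str:
--     n = 0
--     for line in input.splitlines():
--         v = 0
--         for c in line:
--             v = v * 5 + numerals[c]   # Horner evaluation of the SNAFU numeral
--         n += v
--
--     # single-pass balanced base-5 conversion, most significant digit ends up leftmost
--     s = ""
--     while n > 0:
--         r = n % 5
--         if r <= 2:
--             s = encoders[r] + s
--             n = n // 5
--         else:
--             s = encoders[r - 5] + s
--             n = n // 5 + 1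
--     if not s:
--         raise ValueError("cannot encode a non-positive value")
--     return s
-- ===== Notes on version B (the rewrite author's own statement) =====
-- stated objective: simpler
-- what changed: decode's per-character 5**(k-1-i) power sum becomes a Horner fold, and encode's three-phase dict pipeline (base-5 digit dict, carry loop over range(digits), list extraction) becomes a single while loop doing balanced base-5 conversion directly.
import Mathlib
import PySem

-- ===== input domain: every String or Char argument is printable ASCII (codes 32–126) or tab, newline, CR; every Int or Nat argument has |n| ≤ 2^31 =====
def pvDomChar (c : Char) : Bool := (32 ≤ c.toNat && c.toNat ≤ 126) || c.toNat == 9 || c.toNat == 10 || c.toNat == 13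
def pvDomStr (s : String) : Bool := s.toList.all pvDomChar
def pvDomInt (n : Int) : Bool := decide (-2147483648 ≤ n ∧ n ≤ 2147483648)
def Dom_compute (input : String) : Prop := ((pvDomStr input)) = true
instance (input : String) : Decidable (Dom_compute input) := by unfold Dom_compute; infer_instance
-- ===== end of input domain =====

-- B replaces A's three-phase dict/carry encoder and positional-power decoder by a Horner decode and a
-- single-pass balanced base-5 conversion (objective: simpler; same asymptotic cost).

-- ===== PORT A =====

-- numerals = {"2": 2, ...} (1-char string keys, modelled as Char) ; encoders = inverse dict
def numeralsD : PySem.Dict Char Int := PySem.Dict.mk [('2', 2), ('1', 1), ('0', 0), ('-', -1), ('=', -2)]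
def encodersD : PySem.Dict Int Char := PySem.Dict.mk [(2, '2'), (1, '1'), (0, '0'), (-1, '-'), (-2, '=')]

-- decode: n += numerals[x] * 5 ** (k - 1 - i).  numerals[x] raises KeyError for a char outside the
-- dict (excluded by Pre_); the exponent k-1-i is ≥ 0 for every enumerate index, so .toNat is exact.
def decodeA (xs : List Char) : Int :=
  let k : Int := PySem.List.len xs
  (PySem.List.enumerate xs).foldl
    (fun n p => n + numeralsD.getD p.2 0 * 5 ^ (k - 1 - p.1).toNat) 0

-- while n > 0: t = n % 5; ls[i] = t; n = n // 5; i += 1   (fuel n.toNat makes the loop structural;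
-- lsLoopA_step below proves the exact while-loop equation, so the fuel is invisible)
def lsLoopAGo : Nat → Int → Int → PySem.Dict Int Int → PySem.Dict Int Int
  | 0, _, _, ls => ls
  | f + 1, n, i, ls =>
    if 0 < n then lsLoopAGo f (PySem.Int.floordiv n 5) (i + 1) (ls.insert i (PySem.Int.mod n 5))
    else ls

def lsLoopA (n i : Int) (ls : PySem.Dict Int Int) : PySem.Dict Int Int := lsLoopAGo n.toNat n i ls

-- body of 'for i in range(digits)':  l = ls[i] (present here; KeyError never reachable, getD is exact);
-- ls[i] = l - 5; then 'if (i+1) in ls: ls[i+1] += 1 else: ls[i+1] = 1'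
def carryStepA (ls : PySem.Dict Int Int) (i : Int) : PySem.Dict Int Int :=
  let l := ls.getD i 0
  if l ≤ 2 then ls
  else
    let ls1 := ls.insert i (l - 5)
    if ls1.contains (i + 1) then ls1.insert (i + 1) (ls1.getD (i + 1) 0 + 1)
    else ls1.insert (i + 1) 1

def encodeA (n : Int) : String :=
  let ls := lsLoopA n 0 (PySem.Dict.mk [])
  match PySem.List.max? ls.keys (fun x => x) with
  | none => ""          -- Python: max() of the empty dict raises ValueError (n ≤ 0); outside Pre_
  | some digits =>
    let ls2 := (PySem.List.pyRange 0 digits 1).foldl carryStepA ls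
    -- ps = [0] * (max(ls.keys()) + 1)  (keys are nonempty here, so the getD 0 default is never read)
    let m := (PySem.List.max? ls2.keys (fun x => x)).getD 0
    let ps0 : List Int := List.replicate (m + 1).toNat 0
    -- for i, l in ls.items(): ps[i] = l   (every key is a valid index, pySetD is exact here)
    let ps := ls2.items.foldl (fun ps p => PySem.List.pySetD ps p.1 p.2) ps0
    -- for p in ps: s = encoders[p] + s   (encoders[p] raises KeyError for p ∉ [-2,2]; outside Pre_)
    String.ofList (ps.foldl (fun s p => encodersD.getD p '?' :: s) [])

def compute (input : String) : String :=
  let xs := PySem.Str.splitlines input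
  let n := xs.foldl (fun n x => n + decodeA x.toList) 0
  -- the four 'assert decode(…) == …' in A hold and have no effect
  encodeA n

-- ===== PORT B =====

-- v = v * 5 + numerals[c]  (Horner; KeyError outside Pre_, getD default never read inside Pre_)
def decodeAltLine (cs : List Char) : Int :=
  cs.foldl (fun v c => v * 5 + numeralsD.getD c 0) 0

-- while n > 0: r = n % 5; prepend encoders[r] (or encoders[r-5] with carry); fuel as above
def encLoopBGo : Nat → Int → List Char → List Char
  | 0, _, s => s
  | f + 1, n, s =>
    if 0 < n then
      let r := PySem.Int.mod n 5
      if r ≤ 2 then encLoopBGo f (PySem.Int.floordiv n 5) (encodersD.getD r '?' :: s)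
      else encLoopBGo f (PySem.Int.floordiv n 5 + 1) (encodersD.getD (r - 5) '?' :: s)
    else s

def encLoopB (n : Int) (s : List Char) : List Char := encLoopBGo n.toNat n s

def compute_alt (input : String) : String :=
  let n := (PySem.Str.splitlines input).foldl (fun n line => n + decodeAltLine line.toList) 0
  -- Source B raises ValueError when the loop produced no digits (n ≤ 0); outside Pre_
  String.ofList (encLoopB n [])

-- ===== PRECONDITION & SPEC =====

-- A raises outside Pre_: KeyError in decode on a char outside the numerals dict; ValueError
-- (max() of the empty dict) when the sum is ≤ 0; KeyError in encode when the balanced base-5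
-- representation of the sum needs one more digit than its plain base-5 one (2n ≥ 5^⌈log₅⌉ bound).
def pvDig (c : Char) : Int :=
  if c = '2' then 2 else if c = '1' then 1 else if c = '0' then 0 else if c = '-' then -1 else -2

def pvLineVal (cs : List Char) : Int := cs.foldl (fun v c => 5 * v + pvDig c) 0

def pvTotal (input : String) : Int :=
  ((PySem.Str.splitlines input).map (fun l => pvLineVal l.toList)).sum

def pvValidChar (c : Char) : Bool := c == '2' || c == '1' || c == '0' || c == '-' || c == '='

def Pre_compute (input : String) : Prop :=
  ((PySem.Str.splitlines input).all (fun l => l.toList.all pvValidChar)) = true ∧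
  0 < pvTotal input ∧
  2 * (pvTotal input).toNat < 5 ^ (Nat.log 5 (pvTotal input).toNat + 1)

instance (input : String) : Decidable (Pre_compute input) := by unfold Pre_compute; infer_instance

def pvWitness_compute : String := "2"

def Spec_compute (input : String) (out : String) : Prop := out = compute_alt input
instance (input : String) (out : String) : Decidable (Spec_compute input out) := by unfold Spec_compute; infer_instance

-- ===== CLAIM (what is proved, stated in full; the proofs are below) =====

def Claim_equal_compute : Prop :=
  ∀ (input : String), Dom_compute input → Pre_compute input → Spec_compute input (compute input)

-- ===== LEMMAS AND PROOFS =====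


-- proof-side digit-list machinery --------------------------------------------------------------

/-- association list `[(i, a₀), (i+1, a₁), …]` — the shape of A's digit dict. -/
def withKeys : Int → List Int → List (Int × Int)
  | _, [] => []
  | i, d :: ds => (i, d) :: withKeys (i + 1) ds

/-- value of a little-endian balanced/plain base-5 digit list. -/
def dval : List Int → Int
  | [] => 0
  | d :: ds => d + 5 * dval ds

/-- A's carry pass over the digit array, as structural recursion (the last digit is not processed). -/
def carryL : List Int → List Int
  | [] => []
  | [d] => [d]
  | d :: e :: ds => if d ≤ 2 then d :: carryL (e :: ds) else (d - 5) :: carryL ((e + 1) :: ds)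
termination_by a => a.length

/-- most-significant-first rendering of a little-endian digit list. -/
def render : List Int → List Char
  | [] => []
  | d :: ds => render ds ++ [encodersD.getD d '?']

/-- plain base-5 digits of `n` (little-endian), mirroring `lsLoopAGo`'s fuel. -/
def dig5Go : Nat → Int → List Int
  | 0, _ => []
  | f + 1, n =>
    if 0 < n then PySem.Int.mod n 5 :: dig5Go f (PySem.Int.floordiv n 5) else []

def dig5 (n : Int) : List Int := dig5Go n.toNat n

/-- balanced base-5 digits of `n` (little-endian), mirroring `encLoopBGo`'s fuel. -/
def digBGo : Nat → Int → List Int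
  | 0, _ => []
  | f + 1, n =>
    if 0 < n then
      let r := PySem.Int.mod n 5
      if r ≤ 2 then r :: digBGo f (PySem.Int.floordiv n 5)
      else (r - 5) :: digBGo f (PySem.Int.floordiv n 5 + 1)
    else []

def digB (n : Int) : List Int := digBGo n.toNat n

-- arithmetic helpers ---------------------------------------------------------------------------

theorem pvDec1 {n : Int} (h : 0 < n) : (PySem.Int.floordiv n 5).toNat < n.toNat := by
  rw [PySem.Int.floordiv_eq_ediv_of_pos (by norm_num)]; omega

theorem pvDec2 {n : Int} (h : 0 < n) (h2 : ¬ PySem.Int.mod n 5 ≤ 2) :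
    (PySem.Int.floordiv n 5 + 1).toNat < n.toNat := by
  rw [PySem.Int.floordiv_eq_ediv_of_pos (by norm_num)]
  rw [PySem.Int.mod_eq_emod_of_pos (by norm_num)] at h2
  omega

theorem pvFdiv_nonneg {n : Int} (h : 0 < n) : 0 ≤ PySem.Int.floordiv n 5 := by
  rw [PySem.Int.floordiv_eq_ediv_of_pos (by norm_num)]; omega

-- decode ---------------------------------------------------------------------------------------

theorem dval_append (xs : List Int) (t : Int) :
    dval (xs ++ [t]) = dval xs + t * 5 ^ xs.length := by
  induction xs with
  | nil => simp [dval]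
  | cons d ds ih => simp [dval, ih, pow_succ]; ring

/-- value of a big-endian digit list. -/
def bval (l : List Int) : Int := dval l.reverse

theorem bval_cons (d : Int) (ds : List Int) : bval (d :: ds) = d * 5 ^ ds.length + bval ds := by
  unfold bval
  rw [List.reverse_cons, dval_append]
  simp [List.length_reverse]
  ring

theorem pvEnumSum (dd : Char → Int) :
    ∀ (cs : List Char) (s k : Int), s + cs.length = k →
      ((PySem.List.enumerate cs s).map (fun p => dd p.2 * 5 ^ (k - 1 - p.1).toNat)).sum
        = bval (cs.map dd) := by
  intro cs
  induction cs with
  | nil => intro s k h; simp [bval, dval]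
  | cons c t ih =>
    intro s k h
    simp only [List.length_cons] at h
    rw [PySem.List.enumerate_cons]
    simp only [List.map_cons, List.sum_cons]
    rw [ih (s + 1) k (by push_cast at h; omega)]
    rw [bval_cons]
    have hlen : (k - 1 - s).toNat = t.length := by push_cast at h; omega
    rw [hlen, List.length_map]

theorem decodeA_eq_bval (cs : List Char) :
    decodeA cs = bval (cs.map (fun c => numeralsD.getD c 0)) := by
  unfold decodeA
  rw [PySem.List.foldl_add (g := fun p : Int × Char => numeralsD.getD p.2 0 * 5 ^ ((PySem.List.len cs) - 1 - p.1).toNat)]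
  rw [pvEnumSum (fun c => numeralsD.getD c 0) cs 0 (PySem.List.len cs) (by simp [PySem.List.len_eq])]
  ring

theorem horner_eq_bval (dd : Char → Int) :
    ∀ (cs : List Char) (a : Int),
      cs.foldl (fun v c => v * 5 + dd c) a = a * 5 ^ cs.length + bval (cs.map dd) := by
  intro cs
  induction cs with
  | nil => intro a; simp [bval, dval]
  | cons c t ih =>
    intro a
    simp only [List.foldl_cons, List.map_cons, List.length_cons]
    rw [ih, bval_cons, List.length_map, pow_succ]
    ring

theorem decodeAltLine_eq_bval (cs : List Char) :
    decodeAltLine cs = bval (cs.map (fun c => numeralsD.getD c 0)) := by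
  unfold decodeAltLine
  rw [horner_eq_bval]; ring

theorem decodeA_eq_alt (cs : List Char) : decodeA cs = decodeAltLine cs := by
  rw [decodeA_eq_bval, decodeAltLine_eq_bval]

theorem pvDig_eq {c : Char} (h : pvValidChar c = true) : pvDig c = numeralsD.getD c 0 := by
  unfold pvValidChar at h
  rcases Bool.or_eq_true_iff.1 h with h' | h4
  rcases Bool.or_eq_true_iff.1 h' with h' | h3
  rcases Bool.or_eq_true_iff.1 h' with h' | h2
  rcases Bool.or_eq_true_iff.1 h' with h0 | h1
  all_goals first
    | (simp only [beq_iff_eq] at *; subst_vars; decide)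

theorem pvLineVal_eq {cs : List Char} (h : cs.all pvValidChar = true) :
    pvLineVal cs = decodeAltLine cs := by
  unfold pvLineVal decodeAltLine
  have : ∀ (a : Int) (l : List Char), l.all pvValidChar = true →
      l.foldl (fun v c => 5 * v + pvDig c) a = l.foldl (fun v c => v * 5 + numeralsD.getD c 0) a := by
    intro a l
    induction l generalizing a with
    | nil => intro _; rfl
    | cons c t ih =>
      intro hl
      simp only [List.all_cons, Bool.and_eq_true] at hl
      simp only [List.foldl_cons]
      rw [pvDig_eq hl.1, mul_comm]
      exact ih _ hl.2
  exact this 0 cs h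

theorem pvSums (input : String)
    (h : (PySem.Str.splitlines input).all (fun l => l.toList.all pvValidChar) = true) :
    ((PySem.Str.splitlines input).foldl (fun n x => n + decodeA x.toList) 0 = pvTotal input) ∧
    ((PySem.Str.splitlines input).foldl (fun n line => n + decodeAltLine line.toList) 0 = pvTotal input) := by
  rw [List.all_eq_true] at h
  unfold pvTotal
  rw [PySem.List.foldl_add (g := fun x : String => decodeA x.toList),
      PySem.List.foldl_add (g := fun x : String => decodeAltLine x.toList)]
  have hmap : ∀ g : String → Int, (∀ l ∈ PySem.Str.splitlines input, g l = pvLineVal l.toList) →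
      ((PySem.Str.splitlines input).map g).sum = ((PySem.Str.splitlines input).map (fun l => pvLineVal l.toList)).sum := by
    intro g hg
    congr 1
    exact List.map_congr_left hg
  constructor
  · rw [zero_add]
    apply hmap
    intro l hl
    rw [decodeA_eq_alt]
    exact (pvLineVal_eq (h l hl)).symm
  · rw [zero_add]
    apply hmap
    intro l hl
    exact (pvLineVal_eq (h l hl)).symm

-- the digit dict as an array -------------------------------------------------------------------

theorem length_withKeys (a : List Int) : ∀ i, (withKeys i a).length = a.length := by
  induction a with
  | nil => intro i; rfl
  | cons d t ih => intro i; simp [withKeys, ih]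

theorem mem_fst_withKeys (a : List Int) : ∀ i x, x ∈ (withKeys i a).map Prod.fst ↔ i ≤ x ∧ x < i + a.length := by
  induction a with
  | nil => intro i x; simp [withKeys]
  | cons d t ih =>
    intro i x
    simp only [withKeys, List.map_cons, List.mem_cons, ih, List.length_cons]
    constructor
    · rintro (rfl | ⟨h1, h2⟩) <;> push_cast <;> omega
    · intro ⟨h1, h2⟩
      by_cases hx : x = i
      · exact Or.inl hx
      · right; push_cast at h2 ⊢; omega

theorem maxW (a : List Int) (i : Int) (h : a ≠ []) :
    PySem.List.max? ((withKeys i a).map Prod.fst) (fun x => x) = some (i + a.length - 1) := by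
  cases hm : PySem.List.max? ((withKeys i a).map Prod.fst) (fun x => x) with
  | none =>
    rw [PySem.List.max?_eq_none_iff] at hm
    have := congrArg List.length hm
    simp [length_withKeys] at this
    exact absurd this h
  | some m =>
    have hmem := PySem.List.max?_mem hm
    have hmax := PySem.List.max?_isMax hm (i + a.length - 1)
      ((mem_fst_withKeys a i _).2 (by
        have h1 : 1 ≤ a.length := by cases a with | nil => exact absurd rfl h | cons x t => simp
        omega))
    rw [mem_fst_withKeys] at hmem
    simp only [Option.some.injEq]
    omega

theorem get?W (a : List Int) : ∀ (i : Int) (j : Nat) (hj : j < a.length),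
    (PySem.Dict.mk (withKeys i a)).get? (i + (j : Int)) = some a[j] := by
  induction a with
  | nil => intro i j hj; simp at hj
  | cons d t ih =>
    intro i j hj
    show (PySem.Dict.mk ((i, d) :: withKeys (i + 1) t)).get? (i + (j : Int)) = _
    rw [PySem.Dict.get?_mk_cons]
    cases j with
    | zero => simp
    | succ j =>
      have hne : (i == i + ((j + 1 : Nat) : Int)) = false := by
        simp only [beq_eq_false_iff_ne, ne_eq]; push_cast; omega
      rw [hne]
      simp only [Bool.false_eq_true, if_false]
      have hidx : i + ((j + 1 : Nat) : Int) = (i + 1) + (j : Int) := by push_cast; ring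
      rw [hidx, ih (i + 1) j (by simpa using hj)]
      simp

theorem getDW (a : List Int) (i : Int) (j : Nat) (hj : j < a.length) (d0 : Int) :
    (PySem.Dict.mk (withKeys i a)).getD (i + (j : Int)) d0 = a[j] := by
  rw [PySem.Dict.getD_eq_get?_getD, get?W a i j hj]; rfl

theorem containsW (a : List Int) (i : Int) (j : Nat) (hj : j < a.length) :
    (PySem.Dict.mk (withKeys i a)).contains (i + (j : Int)) = true := by
  rw [PySem.Dict.contains_eq_isSome_get?, get?W a i j hj]; rfl

theorem mapIdW (v : Int) : ∀ (a : List Int) (i k : Int), k < i →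
    (withKeys i a).map (fun p => if (p.1 == k) = true then (k, v) else p) = withKeys i a := by
  intro a
  induction a with
  | nil => intro i k _; rfl
  | cons d t ih =>
    intro i k hk
    simp only [withKeys, List.map_cons]
    have : (i == k) = false := by simp only [beq_eq_false_iff_ne, ne_eq]; omega
    rw [this]
    simp only [Bool.false_eq_true, if_false]
    rw [ih (i + 1) k (by omega)]

theorem mapSetW (v : Int) : ∀ (a : List Int) (i : Int) (j : Nat), j < a.length →
    (withKeys i a).map (fun p => if (p.1 == i + (j : Int)) = true then (i + (j : Int), v) else p)
      = withKeys i (a.set j v) := by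
  intro a
  induction a with
  | nil => intro i j hj; simp at hj
  | cons d t ih =>
    intro i j hj
    cases j with
    | zero =>
      simp only [withKeys, List.map_cons, Nat.cast_zero, add_zero, beq_self_eq_true, if_true, List.set]
      congr 1
      exact mapIdW v t (i + 1) i (by omega)
    | succ j =>
      simp only [withKeys, List.map_cons, List.set]
      have hne : (i == i + ((j + 1 : Nat) : Int)) = false := by
        simp only [beq_eq_false_iff_ne, ne_eq]; push_cast; omega
      rw [hne]
      simp only [Bool.false_eq_true, if_false]
      congr 1
      have hidx : i + ((j + 1 : Nat) : Int) = (i + 1) + (j : Int) := by push_cast; ring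
      rw [hidx]
      exact ih (i + 1) j (by simpa using hj)

theorem insertW (a : List Int) (i : Int) (j : Nat) (v : Int) (hj : j < a.length) :
    (PySem.Dict.mk (withKeys i a)).insert (i + (j : Int)) v = PySem.Dict.mk (withKeys i (a.set j v)) := by
  apply PySem.Dict.ext
  rw [PySem.Dict.items_insert_of_contains _ _ (containsW a i j hj)]
  exact mapSetW v a i j hj

-- phase 1: the while loop builds exactly the base-5 digit dict ----------------------------------

theorem lsLoopGo_items : ∀ (f : Nat) (n i : Int) (ls : PySem.Dict Int Int), n.toNat ≤ f →
    (∀ p ∈ ls.items, p.1 < i) →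
    (lsLoopAGo f n i ls).items = ls.items ++ withKeys i (dig5Go f n) := by
  intro f
  induction f with
  | zero => intro n i ls _ _; simp [lsLoopAGo, dig5Go, withKeys]
  | succ f ih =>
    intro n i ls hf hlt
    by_cases hn : 0 < n
    · simp only [lsLoopAGo, dig5Go, hn, if_true]
      have hcont : ls.contains i = false := by
        rw [← Bool.not_eq_true, PySem.Dict.contains_iff_mem_keys]
        intro hmem
        simp only [PySem.Dict.keys, List.mem_map] at hmem
        obtain ⟨p, hp, hpi⟩ := hmem
        have := hlt p hp
        omega
      have hins := PySem.Dict.items_insert_of_not_contains ls (PySem.Int.mod n 5) hcont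
      have hlt' : ∀ p ∈ (ls.insert i (PySem.Int.mod n 5)).items, p.1 < i + 1 := by
        intro p hp
        rw [hins] at hp
        rcases List.mem_append.1 hp with hmem | hmem
        · have := hlt p hmem; omega
        · have : p = (i, PySem.Int.mod n 5) := by simpa using hmem
          rw [this]; omega
      rw [ih (PySem.Int.floordiv n 5) (i + 1) _ (by have := pvDec1 hn; omega) hlt']
      rw [hins, List.append_assoc]
      rfl
    · simp [lsLoopAGo, dig5Go, hn, withKeys]

-- dig5 / digB properties -----------------------------------------------------------------------

theorem dig5Go_nil_of_nonpos (f : Nat) {n : Int} (h : ¬ 0 < n) : dig5Go f n = [] := by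
  cases f <;> simp [dig5Go, h]

theorem dval_dig5Go : ∀ (f : Nat) (n : Int), 0 ≤ n → n.toNat ≤ f → dval (dig5Go f n) = n := by
  intro f
  induction f with
  | zero =>
    intro n h0 hf
    have hz : n = 0 := by omega
    subst hz
    rfl
  | succ f ih =>
    intro n h0 hf
    by_cases hn : 0 < n
    · simp only [dig5Go, hn, if_true, dval]
      rw [ih _ (pvFdiv_nonneg hn) (by have := pvDec1 hn; omega)]
      have := PySem.Int.floordiv_mul_add_mod n 5
      ring_nf
      ring_nf at this
      omega
    · simp [dig5Go, hn, dval]; omega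

theorem mem_dig5Go : ∀ (f : Nat) (n d : Int), d ∈ dig5Go f n → 0 ≤ d ∧ d < 5 := by
  intro f
  induction f with
  | zero => intro n d h; simp [dig5Go] at h
  | succ f ih =>
    intro n d h
    by_cases hn : 0 < n
    · simp only [dig5Go, hn, if_true, List.mem_cons] at h
      rcases h with rfl | h
      · exact ⟨PySem.Int.mod_nonneg n (by norm_num), PySem.Int.mod_lt n (by norm_num)⟩
      · exact ih _ d h
    · simp [dig5Go, hn] at h

theorem last_dig5Go : ∀ (f : Nat) (n : Int), 0 < n → n.toNat ≤ f →
    ∃ t, (dig5Go f n).getLast? = some t ∧ 0 < t := by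
  intro f
  induction f with
  | zero => intro n hn hf; omega
  | succ f ih =>
    intro n hn hf
    simp only [dig5Go, hn, if_true]
    by_cases hd : 0 < PySem.Int.floordiv n 5
    · obtain ⟨t, ht, htpos⟩ := ih _ hd (by have := pvDec1 hn; omega)
      refine ⟨t, ?_, htpos⟩
      have hne : dig5Go f (PySem.Int.floordiv n 5) ≠ [] := by
        intro hnil; rw [hnil] at ht; simp at ht
      cases hdig : dig5Go f (PySem.Int.floordiv n 5) with
      | nil => exact absurd hdig hne
      | cons x xs => rw [hdig] at ht; rw [List.getLast?_cons_cons]; exact ht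
    · rw [dig5Go_nil_of_nonpos f hd]
      refine ⟨PySem.Int.mod n 5, rfl, ?_⟩
      have hdd := PySem.Int.floordiv_mul_add_mod n 5
      have h0 := pvFdiv_nonneg hn
      have : PySem.Int.floordiv n 5 = 0 := by omega
      rw [this] at hdd; omega

theorem digBGo_nil_of_nonpos (f : Nat) {n : Int} (h : ¬ 0 < n) : digBGo f n = [] := by
  cases f <;> simp [digBGo, h]

theorem dval_digBGo : ∀ (f : Nat) (n : Int), 0 ≤ n → n.toNat ≤ f → dval (digBGo f n) = n := by
  intro f
  induction f with
  | zero =>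
    intro n h0 hf
    have hz : n = 0 := by omega
    subst hz
    rfl
  | succ f ih =>
    intro n h0 hf
    by_cases hn : 0 < n
    · simp only [digBGo, hn, if_true]
      have hdd := PySem.Int.floordiv_mul_add_mod n 5
      by_cases hr : PySem.Int.mod n 5 ≤ 2
      · simp only [hr, if_true, dval]
        rw [ih _ (pvFdiv_nonneg hn) (by have := pvDec1 hn; omega)]
        omega
      · simp only [hr, if_false, dval]
        rw [ih _ (by have := pvFdiv_nonneg hn; omega) (by have := pvDec2 hn hr; omega)]
        ring_nf
        omega
    · simp [digBGo, hn, dval]; omega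

theorem mem_digBGo : ∀ (f : Nat) (n d : Int), d ∈ digBGo f n → -2 ≤ d ∧ d ≤ 2 := by
  intro f
  induction f with
  | zero => intro n d h; simp [digBGo] at h
  | succ f ih =>
    intro n d h
    by_cases hn : 0 < n
    · have h1 := PySem.Int.mod_nonneg n (show (0:Int) < 5 by norm_num)
      have h2 := PySem.Int.mod_lt n (show (0:Int) < 5 by norm_num)
      by_cases hr : PySem.Int.mod n 5 ≤ 2
      · simp only [digBGo, hn, if_true, hr, List.mem_cons] at h
        rcases h with rfl | h
        · omega
        · exact ih _ d h
      · simp only [digBGo, hn, if_true, hr, if_false, List.mem_cons] at h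
        rcases h with rfl | h
        · omega
        · exact ih _ d h
    · simp [digBGo, hn] at h

theorem last_digBGo : ∀ (f : Nat) (n : Int), 0 < n → n.toNat ≤ f →
    ∃ t, (digBGo f n).getLast? = some t ∧ 0 < t := by
  intro f
  induction f with
  | zero => intro n hn hf; omega
  | succ f ih =>
    intro n hn hf
    have hdd := PySem.Int.floordiv_mul_add_mod n 5
    by_cases hr : PySem.Int.mod n 5 ≤ 2
    · simp only [digBGo, hn, if_true, hr]
      by_cases hd : 0 < PySem.Int.floordiv n 5
      · obtain ⟨t, ht, htpos⟩ := ih _ hd (by have := pvDec1 hn; omega)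
        refine ⟨t, ?_, htpos⟩
        cases hdig : digBGo f (PySem.Int.floordiv n 5) with
        | nil => rw [hdig] at ht; simp at ht
        | cons x xs => rw [hdig] at ht; rw [List.getLast?_cons_cons]; exact ht
      · rw [digBGo_nil_of_nonpos f hd]
        have : PySem.Int.floordiv n 5 = 0 := by have := pvFdiv_nonneg hn; omega
        rw [this] at hdd
        exact ⟨PySem.Int.mod n 5, rfl, by omega⟩
    · simp only [digBGo, hn, if_true, hr, if_false]
      have hd : 0 < PySem.Int.floordiv n 5 + 1 := by have := pvFdiv_nonneg hn; omega
      obtain ⟨t, ht, htpos⟩ := ih _ hd (by have := pvDec2 hn hr; omega)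
      refine ⟨t, ?_, htpos⟩
      cases hdig : digBGo f (PySem.Int.floordiv n 5 + 1) with
      | nil => rw [hdig] at ht; simp at ht
      | cons x xs => rw [hdig] at ht; rw [List.getLast?_cons_cons]; exact ht

-- carryL properties -----------------------------------------------------------------------------

theorem length_carryL : ∀ a : List Int, (carryL a).length = a.length := by
  intro a
  induction a using carryL.induct with
  | case1 => simp [carryL]
  | case2 d => simp [carryL]
  | case3 d e ds h ih => simp [carryL, h, ih]
  | case4 d e ds h ih => simp [carryL, h, ih]

theorem dval_carryL : ∀ a : List Int, dval (carryL a) = dval a := by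
  intro a
  induction a using carryL.induct with
  | case1 => simp [carryL]
  | case2 d => simp [carryL]
  | case3 d e ds h ih => simp only [carryL, h, if_true, dval] at *; omega
  | case4 d e ds h ih => simp only [carryL, h, if_false, dval] at *; omega

theorem carryL_ne_nil {a : List Int} (h : a ≠ []) : carryL a ≠ [] := by
  intro hnil
  have := length_carryL a
  rw [hnil] at this
  exact h (List.length_eq_zero_iff.1 this.symm)

/-- digit shape preserved by the carry pass: the worklist head can reach 5, the rest stays < 5. -/
theorem dropLast_carryL : ∀ a : List Int,
    (∀ x ∈ a, 0 ≤ x ∧ x ≤ 5) → (∀ x ∈ a.tail, x < 5) →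
    ∀ x ∈ (carryL a).dropLast, -2 ≤ x ∧ x ≤ 2 := by
  intro a
  induction a using carryL.induct with
  | case1 => intro _ _ x hx; simp [carryL] at hx
  | case2 d => intro _ _ x hx; simp [carryL] at hx
  | case3 d e ds h ih =>
    intro h05 htl x hx
    rw [carryL, if_pos h] at hx
    rw [List.dropLast_cons_of_ne_nil (carryL_ne_nil (by simp))] at hx
    rcases List.mem_cons.1 hx with hx1 | hx
    · rw [hx1]
      have h1 := (h05 d (by simp)).1
      constructor <;> omega
    · refine ih ?_ ?_ x hx
      · intro y hy
        exact h05 y (List.mem_cons_of_mem d hy)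
      · intro y hy
        exact htl y (List.mem_cons_of_mem e hy)
  | case4 d e ds h ih =>
    intro h05 htl x hx
    rw [carryL, if_neg h] at hx
    rw [List.dropLast_cons_of_ne_nil (carryL_ne_nil (by simp))] at hx
    rcases List.mem_cons.1 hx with hx1 | hx
    · rw [hx1]
      have h2 := (h05 d (by simp)).2
      constructor <;> omega
    · refine ih ?_ ?_ x hx
      · intro y hy
        rcases List.mem_cons.1 hy with rfl | hy
        · have h1 := (h05 e (by simp)).1
          have h2 := htl e (by simp)
          constructor <;> omega
        · exact h05 y (List.mem_cons_of_mem d (List.mem_cons_of_mem e hy))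
      · intro y hy
        exact htl y (List.mem_cons_of_mem e hy)

theorem last_carryL : ∀ (a : List Int) (t : Int), a.getLast? = some t →
    ∃ t', (carryL a).getLast? = some t' ∧ t ≤ t' := by
  intro a
  induction a using carryL.induct with
  | case1 => intro t ht; simp at ht
  | case2 d => intro t ht; simp at ht; subst ht; exact ⟨d, by simp [carryL], le_refl _⟩
  | case3 d e ds h ih =>
    intro t ht
    rw [List.getLast?_cons_cons] at ht
    obtain ⟨t', ht', hle⟩ := ih t ht
    refine ⟨t', ?_, hle⟩
    rw [carryL, if_pos h]
    cases hc : carryL (e :: ds) with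
    | nil => exact absurd hc (carryL_ne_nil (by simp))
    | cons x xs => rw [hc] at ht'; rw [List.getLast?_cons_cons]; exact ht'
  | case4 d e ds h ih =>
    intro t ht
    rw [List.getLast?_cons_cons] at ht
    have hht : ∃ s, ((e + 1) :: ds).getLast? = some s ∧ t ≤ s := by
      cases ds with
      | nil =>
        simp only [List.getLast?_singleton, Option.some.injEq] at ht
        exact ⟨e + 1, by simp, by omega⟩
      | cons y ys =>
        refine ⟨t, ?_, le_refl t⟩
        rw [List.getLast?_cons_cons]
        rw [List.getLast?_cons_cons] at ht
        exact ht
    obtain ⟨s, hs, hts⟩ := hht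
    obtain ⟨t', ht', hle⟩ := ih s hs
    refine ⟨t', ?_, by omega⟩
    rw [carryL, if_neg h]
    cases hc : carryL ((e + 1) :: ds) with
    | nil => exact absurd hc (carryL_ne_nil (by simp))
    | cons x xs => rw [hc] at ht'; rw [List.getLast?_cons_cons]; exact ht'

-- dval bounds -----------------------------------------------------------------------------------

theorem dval_nonneg : ∀ a : List Int, (∀ x ∈ a, 0 ≤ x) → 0 ≤ dval a := by
  intro a
  induction a with
  | nil => intro _; simp [dval]
  | cons d t ih =>
    intro h
    have h1 := h d (by simp)
    have h2 := ih (fun x hx => h x (by simp [hx]))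
    simp only [dval]; omega

theorem dval_ub : ∀ a : List Int, (∀ x ∈ a, x < 5) → dval a ≤ 5 ^ a.length - 1 := by
  intro a
  induction a with
  | nil => intro _; simp [dval]
  | cons d t ih =>
    intro h
    have h1 := h d (by simp)
    have h2 := ih (fun x hx => h x (by simp [hx]))
    simp only [dval, List.length_cons, pow_succ]
    nlinarith [pow_pos (show (0:Int) < 5 by norm_num) t.length]

theorem dval_abs_bound : ∀ a : List Int, (∀ x ∈ a, -2 ≤ x ∧ x ≤ 2) →
    -(5 ^ a.length - 1) ≤ 2 * dval a ∧ 2 * dval a ≤ 5 ^ a.length - 1 := by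
  intro a
  induction a with
  | nil => intro _; simp [dval]
  | cons d t ih =>
    intro h
    have h1 := h d (by simp)
    have h2 := ih (fun x hx => h x (by simp [hx]))
    simp only [dval, List.length_cons, pow_succ]
    constructor <;> nlinarith

theorem dval_pos : ∀ a : List Int, (∀ x ∈ a, -2 ≤ x ∧ x ≤ 2) →
    (∀ t, a.getLast? = some t → 0 < t) → a ≠ [] → 0 < dval a := by
  intro a
  induction a with
  | nil => intro _ _ h; exact absurd rfl h
  | cons d t ih =>
    intro hb hl _
    cases t with
    | nil =>
      have := hl d (by simp)
      simp only [dval]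
      omega
    | cons y ys =>
      have hpos : 0 < dval (y :: ys) :=
        ih (fun x hx => hb x (by simp [List.mem_cons.1 hx]))
          (fun s hs => hl s (by rw [List.getLast?_cons_cons]; exact hs)) (by simp)
      have := (hb d (by simp)).1
      simp only [dval] at hpos ⊢
      omega

-- uniqueness of the balanced representation ----------------------------------------------------

theorem dval_uniq : ∀ ds es : List Int,
    (∀ x ∈ ds, -2 ≤ x ∧ x ≤ 2) → (∀ t, ds.getLast? = some t → 0 < t) →
    (∀ x ∈ es, -2 ≤ x ∧ x ≤ 2) → (∀ t, es.getLast? = some t → 0 < t) →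
    dval ds = dval es → ds = es := by
  intro ds
  induction ds with
  | nil =>
    intro es _ _ hb hl hv
    cases es with
    | nil => rfl
    | cons e t =>
      have := dval_pos (e :: t) hb hl (by simp)
      rw [← hv] at this
      simp [dval] at this
  | cons d t ih =>
    intro es hb hl hb' hl' hv
    cases es with
    | nil =>
      have := dval_pos (d :: t) hb hl (by simp)
      rw [hv] at this
      simp [dval] at this
    | cons e s =>
      simp only [dval] at hv
      have hd := hb d (by simp)
      have he := hb' e (by simp)
      have htb := dval_abs_bound t (fun x hx => hb x (by simp [hx]))
      have hsb := dval_abs_bound s (fun x hx => hb' x (by simp [hx]))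
      have hde : d = e ∧ dval t = dval s := by constructor <;> omega
      obtain ⟨rfl, hts⟩ := hde
      congr 1
      refine ih s (fun x hx => hb x (by simp [hx])) ?_ (fun x hx => hb' x (by simp [hx])) ?_ hts
      · intro u hu
        refine hl u ?_
        cases t with
        | nil => simp at hu
        | cons y ys => rw [List.getLast?_cons_cons]; exact hu
      · intro u hu
        refine hl' u ?_
        cases s with
        | nil => simp at hu
        | cons y ys => rw [List.getLast?_cons_cons]; exact hu

-- the carry fold --------------------------------------------------------------------------------

theorem getDW0 (a : List Int) (j : Nat) (hj : j < a.length) (d0 : Int) :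
    (PySem.Dict.mk (withKeys 0 a)).getD ((j : Int)) d0 = a[j] := by
  have := getDW a 0 j hj d0
  simpa using this

theorem insertW0 (a : List Int) (j : Nat) (v : Int) (hj : j < a.length) :
    (PySem.Dict.mk (withKeys 0 a)).insert ((j : Int)) v = PySem.Dict.mk (withKeys 0 (a.set j v)) := by
  have := insertW a 0 j v hj
  simpa using this

theorem containsW0 (a : List Int) (j : Nat) (hj : j < a.length) :
    (PySem.Dict.mk (withKeys 0 a)).contains ((j : Int)) = true := by
  have := containsW a 0 j hj
  simpa using this

theorem getElem_mid (pre t : List Int) (d : Int) :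
    (pre ++ d :: t)[pre.length]'(by simp) = d := by
  rw [List.getElem_append_right (le_refl pre.length)]
  simp

theorem set_mid (pre t : List Int) (d v : Int) :
    (pre ++ d :: t).set pre.length v = pre ++ v :: t := by
  rw [List.set_append, if_neg (by omega)]
  have h0 : pre.length - pre.length = 0 := by omega
  rw [h0]
  rfl

theorem getElem_mid1 (pre t : List Int) (c d : Int) :
    (pre ++ c :: d :: t)[pre.length + 1]'(by simp only [List.length_append, List.length_cons]; omega) = d := by
  rw [List.getElem_append_right (by omega)]
  have h1 : pre.length + 1 - pre.length = 1 := by omega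
  simp [h1]

theorem set_mid1 (pre t : List Int) (c d v : Int) :
    (pre ++ c :: d :: t).set (pre.length + 1) v = pre ++ c :: v :: t := by
  rw [List.set_append, if_neg (by omega)]
  have h1 : pre.length + 1 - pre.length = 1 := by omega
  rw [h1]
  rfl

theorem carry_fold : ∀ (cur pre : List Int),
    (PySem.List.pyRange (pre.length : Int) ((pre.length : Int) + (cur.length : Int) - 1) 1).foldl
        carryStepA (PySem.Dict.mk (withKeys 0 (pre ++ cur)))
      = PySem.Dict.mk (withKeys 0 (pre ++ carryL cur)) := by
  intro cur
  induction cur using carryL.induct with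
  | case1 =>
    intro pre
    rw [PySem.List.pyRange_one_eq_nil (by simp only [List.length_nil]; push_cast; omega)]
    simp [carryL]
  | case2 d =>
    intro pre
    rw [PySem.List.pyRange_one_eq_nil
      (by simp only [List.length_cons, List.length_nil]; push_cast; omega)]
    simp [carryL]
  | case3 d e ds h ih =>
    intro pre
    rw [PySem.List.pyRange_one_cons (by simp only [List.length_cons]; push_cast; omega),
      List.foldl_cons]
    have hstep : carryStepA (PySem.Dict.mk (withKeys 0 (pre ++ d :: e :: ds))) (pre.length : Int)
        = PySem.Dict.mk (withKeys 0 (pre ++ d :: e :: ds)) := by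
      unfold carryStepA
      rw [getDW0 _ pre.length (by simp) 0, getElem_mid]
      simp only [h, if_true]
    rw [hstep]
    have hih := ih (pre ++ [d])
    simp only [List.append_assoc, List.singleton_append, List.length_append,
      List.length_cons, List.length_nil] at hih ⊢
    rw [carryL, if_pos h]
    have harg : ((pre.length : Int) + 1) = ((pre.length + 1 : Nat) : Int) := by push_cast; ring
    have harg2 : ((pre.length : Int) + ((ds.length + 1 + 1 : Nat) : Int) - 1)
        = (((pre.length + 1 : Nat) : Int) + ((ds.length + 1 : Nat) : Int) - 1) := by push_cast; ring
    rw [harg, harg2]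
    exact hih
  | case4 d e ds h ih =>
    intro pre
    rw [PySem.List.pyRange_one_cons (by simp only [List.length_cons]; push_cast; omega),
      List.foldl_cons]
    have hstep : carryStepA (PySem.Dict.mk (withKeys 0 (pre ++ d :: e :: ds))) (pre.length : Int)
        = PySem.Dict.mk (withKeys 0 (pre ++ (d - 5) :: (e + 1) :: ds)) := by
      unfold carryStepA
      rw [getDW0 _ pre.length (by simp) 0, getElem_mid]
      simp only [h, if_false]
      rw [insertW0 _ pre.length _ (by simp), set_mid]
      have hc1 : ((pre.length : Int) + 1) = ((pre.length + 1 : Nat) : Int) := by push_cast; ring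
      rw [hc1, containsW0 _ (pre.length + 1)
        (by simp only [List.length_append, List.length_cons]; omega)]
      simp only [if_true]
      rw [getDW0 _ (pre.length + 1) (by simp only [List.length_append, List.length_cons]; omega) 0]
      rw [getElem_mid1]
      rw [insertW0 _ (pre.length + 1) _ (by simp only [List.length_append, List.length_cons]; omega)]
      rw [set_mid1]
    rw [hstep]
    have hih := ih (pre ++ [d - 5])
    simp only [List.append_assoc, List.singleton_append, List.length_append,
      List.length_cons, List.length_nil] at hih ⊢
    rw [carryL, if_neg h]
    have harg : ((pre.length : Int) + 1) = ((pre.length + 1 : Nat) : Int) := by push_cast; ring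
    have harg2 : ((pre.length : Int) + ((ds.length + 1 + 1 : Nat) : Int) - 1)
        = (((pre.length + 1 : Nat) : Int) + ((ds.length + 1 : Nat) : Int) - 1) := by push_cast; ring
    rw [harg, harg2]
    exact hih

-- ps extraction and rendering ------------------------------------------------------------------

theorem itemsFold : ∀ (b : List Int) (L : Nat) (ps : List Int), ps.length = L + b.length →
    (withKeys (L : Int) b).foldl (fun ps p => PySem.List.pySetD ps p.1 p.2) ps
      = ps.take L ++ b := by
  intro b
  induction b with
  | nil =>
    intro L ps h
    simp only [List.length_nil] at h
    simp only [withKeys, List.foldl_nil, List.append_nil]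
    have hle : ps.length ≤ L := by omega
    exact (List.take_of_length_le hle).symm
  | cons d t ih =>
    intro L ps h
    simp only [List.length_cons] at h
    simp only [withKeys, List.foldl_cons]
    rw [PySem.List.pySetD_natCast]
    have hcast : ((L : Int) + 1) = ((L + 1 : Nat) : Int) := by push_cast; ring
    have hlen2 : (ps.set L d).length = (L + 1) + t.length := by
      simp only [List.length_set]; omega
    rw [hcast, ih (L + 1) (ps.set L d) hlen2]
    have htake : (ps.set L d).take (L + 1) = ps.take L ++ [d] := by
      rw [List.set_eq_take_append_cons_drop, if_pos (by omega)]
      have hl : (ps.take L).length = L := by rw [List.length_take]; omega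
      rw [List.take_append, hl]
      have h1 : L + 1 - L = 1 := by omega
      rw [h1, List.take_take]
      have h2 : min (L + 1) L = L := by omega
      rw [h2]
      rfl
    rw [htake, List.append_assoc]
    rfl

theorem renderFold : ∀ (ds : List Int) (s : List Char),
    ds.foldl (fun s p => encodersD.getD p '?' :: s) s = render ds ++ s := by
  intro ds
  induction ds with
  | nil => intro s; rfl
  | cons d t ih =>
    intro s
    simp only [List.foldl_cons, render, List.append_assoc, List.singleton_append]
    rw [ih]

theorem encLoopB_render : ∀ (f : Nat) (n : Int) (s : List Char), n.toNat ≤ f →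
    encLoopBGo f n s = render (digBGo f n) ++ s := by
  intro f
  induction f with
  | zero => intro n s _; simp [encLoopBGo, digBGo, render]
  | succ f ih =>
    intro n s hf
    by_cases hn : 0 < n
    · by_cases hr : PySem.Int.mod n 5 ≤ 2
      · simp only [encLoopBGo, digBGo, hn, if_true, hr]
        rw [ih _ _ (by have := pvDec1 hn; omega)]
        simp [render]
      · simp only [encLoopBGo, digBGo, hn, if_true, hr, if_false]
        rw [ih _ _ (by have := pvDec2 hn hr; omega)]
        simp [render]
    · simp [encLoopBGo, digBGo, hn, render]

-- wrappers for the Go functions at their natural fuel --------------------------------------------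

theorem dval_dig5 {n : Int} (h0 : 0 ≤ n) : dval (dig5 n) = n := dval_dig5Go n.toNat n h0 le_rfl
theorem mem_dig5 {n d : Int} (h : d ∈ dig5 n) : 0 ≤ d ∧ d < 5 := mem_dig5Go n.toNat n d h
theorem last_dig5 {n : Int} (h : 0 < n) : ∃ t, (dig5 n).getLast? = some t ∧ 0 < t :=
  last_dig5Go n.toNat n h le_rfl
theorem dval_digB {n : Int} (h0 : 0 ≤ n) : dval (digB n) = n := dval_digBGo n.toNat n h0 le_rfl
theorem mem_digB {n d : Int} (h : d ∈ digB n) : -2 ≤ d ∧ d ≤ 2 := mem_digBGo n.toNat n d h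
theorem last_digB {n : Int} (h : 0 < n) : ∃ t, (digB n).getLast? = some t ∧ 0 < t :=
  last_digBGo n.toNat n h le_rfl

theorem ne_nil_of_getLast? {a : List Int} {t : Int} (h : a.getLast? = some t) : a ≠ [] := by
  intro hnil
  subst hnil
  simp at h

-- the balanced digits of the sum, both ways ----------------------------------------------------

/-- translate the `Nat.log` precondition into the `5 ^ (number of base-5 digits)` bound. -/
theorem len_pow_bound (a : List Int) (n : Int) (hn : 0 < n) (hval : dval a = n)
    (hmem : ∀ x ∈ a, 0 ≤ x ∧ x < 5) (hlast : ∃ t, a.getLast? = some t ∧ 0 < t)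
    (hlog : 2 * n.toNat < 5 ^ (Nat.log 5 n.toNat + 1)) : 2 * n < 5 ^ a.length := by
  obtain ⟨tl, htl, htlpos⟩ := hlast
  have hane : a ≠ [] := ne_nil_of_getLast? htl
  have hk1 : 1 ≤ a.length := Nat.pos_of_ne_zero (fun h0 => hane (List.length_eq_zero_iff.1 h0))
  have hub : n < 5 ^ a.length := by
    have := dval_ub a (fun x hx => (hmem x hx).2)
    omega
  have hlb : 5 ^ (a.length - 1) ≤ n := by
    have hdecomp := List.dropLast_append_getLast hane
    have hgl : a.getLast hane = tl := by
      have := List.getLast?_eq_some_getLast hane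
      rw [htl] at this
      exact (Option.some_inj.1 this).symm
    have hv2 : dval (a.dropLast ++ [a.getLast hane]) = n := by rw [hdecomp]; exact hval
    rw [dval_append, hgl] at hv2
    have hnn : 0 ≤ dval a.dropLast :=
      dval_nonneg _ (fun x hx => (hmem x (List.dropLast_subset a hx)).1)
    have hlen : a.dropLast.length = a.length - 1 := by simp [List.length_dropLast]
    rw [hlen] at hv2
    have hp := pow_pos (show (0:Int) < 5 by norm_num) (a.length - 1)
    nlinarith
  have hlogeq : Nat.log 5 n.toNat = a.length - 1 := by
    apply Nat.log_eq_of_pow_le_of_lt_pow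
    · have h5 : ((5 ^ (a.length - 1) : Nat) : Int) ≤ n := by push_cast; exact hlb
      omega
    · have h2 : a.length - 1 + 1 = a.length := by omega
      rw [h2]
      have h5 : n < ((5 ^ a.length : Nat) : Int) := by push_cast; exact hub
      omega
  rw [hlogeq] at hlog
  have h2 : a.length - 1 + 1 = a.length := by omega
  rw [h2] at hlog
  have h5 : ((2 * n.toNat : Nat) : Int) < ((5 ^ a.length : Nat) : Int) := by exact_mod_cast hlog
  push_cast at h5
  omega

theorem carry_valid (a : List Int) (n : Int) (hval : dval a = n)
    (hmem : ∀ x ∈ a, 0 ≤ x ∧ x < 5) (hlast : ∃ t, a.getLast? = some t ∧ 0 < t)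
    (hbound : 2 * n < 5 ^ a.length) :
    (∀ x ∈ carryL a, -2 ≤ x ∧ x ≤ 2) ∧
    (∀ t, (carryL a).getLast? = some t → 0 < t) := by
  obtain ⟨tl, htl, htlpos⟩ := hlast
  have hane : a ≠ [] := ne_nil_of_getLast? htl
  have hk1 : 1 ≤ a.length := Nat.pos_of_ne_zero (fun h0 => hane (List.length_eq_zero_iff.1 h0))
  have hdrop := dropLast_carryL a
    (fun x hx => ⟨(hmem x hx).1, by have := (hmem x hx).2; omega⟩)
    (fun x hx => (hmem x (List.mem_of_mem_tail hx)).2)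
  obtain ⟨t', ht', htle⟩ := last_carryL a tl htl
  have hcne : carryL a ≠ [] := carryL_ne_nil hane
  have hgl' : (carryL a).getLast hcne = t' := by
    have := List.getLast?_eq_some_getLast hcne
    rw [ht'] at this
    exact (Option.some_inj.1 this).symm
  have hdecomp := List.dropLast_append_getLast hcne
  have hlenc : (carryL a).length = a.length := length_carryL a
  have ht'2 : t' ≤ 2 := by
    by_contra h3
    have hv3 : dval ((carryL a).dropLast ++ [t']) = n := by
      rw [hgl'] at hdecomp
      rw [hdecomp, dval_carryL]
      exact hval
    rw [dval_append] at hv3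
    have hlend : (carryL a).dropLast.length = a.length - 1 := by
      simp [List.length_dropLast, hlenc]
    rw [hlend] at hv3
    have habs := (dval_abs_bound _ hdrop).1
    rw [hlend] at habs
    have hp := pow_pos (show (0:Int) < 5 by norm_num) (a.length - 1)
    have hps : (5:Int) ^ a.length = 5 ^ (a.length - 1) * 5 := by
      conv_lhs => rw [show a.length = (a.length - 1) + 1 by omega]
      rw [pow_succ]
    nlinarith
  constructor
  · intro x hx
    conv at hx => rw [← hdecomp]
    rcases List.mem_append.1 hx with hx | hx
    · exact hdrop x hx
    · simp only [List.mem_singleton] at hx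
      subst hx
      rw [hgl']
      omega
  · intro t ht
    rw [ht'] at ht
    have : t' = t := Option.some_inj.1 ht
    omega

theorem carry_eq_digB {n : Int} (hn : 0 < n)
    (hlog : 2 * n.toNat < 5 ^ (Nat.log 5 n.toNat + 1)) :
    carryL (dig5 n) = digB n := by
  have hval : dval (dig5 n) = n := dval_dig5 (by omega)
  have hmem : ∀ x ∈ dig5 n, 0 ≤ x ∧ x < 5 := fun x hx => mem_dig5 hx
  have hlast := last_dig5 hn
  have hbound := len_pow_bound (dig5 n) n hn hval hmem hlast hlog
  obtain ⟨hbA, hlA⟩ := carry_valid (dig5 n) n hval hmem hlast hbound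
  apply dval_uniq _ _ hbA hlA
  · exact fun x hx => mem_digB hx
  · intro t ht
    obtain ⟨t', ht', hpos⟩ := last_digB hn
    rw [ht'] at ht
    have : t' = t := Option.some_inj.1 ht
    omega
  · rw [dval_carryL, hval]
    exact (dval_digB (by omega)).symm

-- encodeA unwound -------------------------------------------------------------------------------

theorem encodeA_eq {n : Int} (hn : 0 < n) :
    encodeA n = String.ofList (render (carryL (dig5 n))) := by
  have hitems : (lsLoopA n 0 (PySem.Dict.mk [])).items = withKeys 0 (dig5 n) := by
    unfold lsLoopA
    rw [lsLoopGo_items n.toNat n 0 _ le_rfl (by intro p hp; simp at hp)]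
    rfl
  have hls : lsLoopA n 0 (PySem.Dict.mk []) = PySem.Dict.mk (withKeys 0 (dig5 n)) :=
    PySem.Dict.ext hitems
  obtain ⟨tl, htl, htlpos⟩ := last_dig5 hn
  have hane : dig5 n ≠ [] := ne_nil_of_getLast? htl
  have hk1 : 1 ≤ (dig5 n).length :=
    Nat.pos_of_ne_zero (fun h0 => hane (List.length_eq_zero_iff.1 h0))
  have hmax : PySem.List.max? ((PySem.Dict.mk (withKeys 0 (dig5 n))).keys) (fun x => x)
      = some (((dig5 n).length : Int) - 1) := by
    rw [show (PySem.Dict.mk (withKeys 0 (dig5 n))).keys = (withKeys 0 (dig5 n)).map Prod.fst from rfl,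
      maxW (dig5 n) 0 hane]
    norm_num
  unfold encodeA
  simp only [hls]
  rw [hmax]
  dsimp only
  have hfold : (PySem.List.pyRange 0 (((dig5 n).length : Int) - 1) 1).foldl carryStepA
      (PySem.Dict.mk (withKeys 0 (dig5 n))) = PySem.Dict.mk (withKeys 0 (carryL (dig5 n))) := by
    have hcf := carry_fold (dig5 n) []
    simp only [List.length_nil, Nat.cast_zero, List.nil_append, zero_add] at hcf
    exact hcf
  rw [hfold]
  have hcne : carryL (dig5 n) ≠ [] := carryL_ne_nil hane
  have hlenc : (carryL (dig5 n)).length = (dig5 n).length := length_carryL (dig5 n)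
  have hmax2 : PySem.List.max? ((PySem.Dict.mk (withKeys 0 (carryL (dig5 n)))).keys) (fun x => x)
      = some (((dig5 n).length : Int) - 1) := by
    rw [show (PySem.Dict.mk (withKeys 0 (carryL (dig5 n)))).keys
        = (withKeys 0 (carryL (dig5 n))).map Prod.fst from rfl,
      maxW (carryL (dig5 n)) 0 hcne, hlenc]
    norm_num
  rw [hmax2]
  simp only [Option.getD_some]
  have hrep : ((((dig5 n).length : Int) - 1 + 1)).toNat = (dig5 n).length := by omega
  rw [hrep]
  have hset : (PySem.Dict.mk (withKeys 0 (carryL (dig5 n)))).items.foldl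
      (fun ps p => PySem.List.pySetD ps p.1 p.2) (List.replicate (dig5 n).length (0:Int))
      = carryL (dig5 n) := by
    show (withKeys 0 (carryL (dig5 n))).foldl _ _ = _
    have hif := itemsFold (carryL (dig5 n)) 0 (List.replicate (dig5 n).length (0:Int))
      (by simp [hlenc])
    simpa using hif
  rw [hset, renderFold]
  simp

-- ===== VERDICT (by name: the statement is the Claim_ definition above) =====
theorem compute_spec : Claim_equal_compute := by
  intro input _ hPre
  obtain ⟨hv, hpos, hlog⟩ := hPre
  unfold Spec_compute compute compute_alt
  obtain ⟨hA, hB⟩ := pvSums input hv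
  simp only []
  rw [hA, hB]
  rw [encodeA_eq hpos, carry_eq_digB hpos hlog]
  unfold encLoopB
  rw [encLoopB_render (pvTotal input).toNat (pvTotal input) [] le_rfl]
  simp only [List.append_nil]
  rfl
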